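-- pv_equiv track=rewrite | github.com/IvanCaceres/literate-journey | api/api.py | createWindowGroups
-- ===== SOURCE A (Python) =====
-- def createWindowGroups(num_windows, window_time, end_time):
--     window_groups = []
--     current_end_time = end_time
--     for x in range(num_windows):
--         start_time = current_end_time - window_time
--         window_dict = {
--             "start": start_time,
--             "end": current_end_time,
--             "bytes_fs": 0,
--             "bytes_ts": 0
--         }
--         window_groups.append(window_dict)
--         # offset 1 second for next window's end time
--         current_end_time = start_time - 1
--     return window_groups
-- ===== SOURCE B (Python) =====
-- def createWindowGroups(num_windows, window_time, end_time):
--     # B: index formula instead of loop-carried end time; computes each window directly from x.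
--     return [
--         {
--             "start": end_time - x * (window_time + 1) - window_time,
--             "end": end_time - x * (window_time + 1),
--             "bytes_fs": 0,
--             "bytes_ts": 0,
--         }
--         for x in range(num_windows)
--     ]
-- ===== Notes on version B (the rewrite author's own statement) =====
-- stated objective: alternative
-- what changed: Replaces the loop-carried current_end_time accumulator with a closed-form per-index formula: window x's end is end_time - x*(window_time+1), built by a comprehension.
import Mathlib
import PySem

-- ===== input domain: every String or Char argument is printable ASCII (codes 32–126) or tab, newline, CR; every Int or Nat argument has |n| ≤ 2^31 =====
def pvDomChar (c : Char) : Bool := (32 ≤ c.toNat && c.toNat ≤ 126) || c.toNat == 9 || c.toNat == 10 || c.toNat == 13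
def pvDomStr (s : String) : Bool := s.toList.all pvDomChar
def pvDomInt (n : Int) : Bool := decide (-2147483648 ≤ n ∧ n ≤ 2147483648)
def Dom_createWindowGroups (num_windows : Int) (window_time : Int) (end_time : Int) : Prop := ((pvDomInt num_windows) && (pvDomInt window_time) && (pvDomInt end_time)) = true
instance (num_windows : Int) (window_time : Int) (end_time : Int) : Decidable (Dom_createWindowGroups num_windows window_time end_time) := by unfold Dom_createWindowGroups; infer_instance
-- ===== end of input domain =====

-- B replaces A's loop-carried current_end_time with a closed-form per-index formula (same cost, different decomposition).
-- ===== PORT A =====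
def createWindowGroups (num_windows : Int) (window_time : Int) (end_time : Int) : List (List (String × Int)) :=
  let st := (PySem.List.pyRange 0 num_windows 1).foldl
    (fun (st : List (List (String × Int)) × Int) _ =>
      let start_time := st.2 - window_time
      let window_dict : List (String × Int) :=
        [("start", start_time), ("end", st.2), ("bytes_fs", 0), ("bytes_ts", 0)]
      (st.1 ++ [window_dict], start_time - 1))
    ([], end_time)
  st.1

-- ===== PORT B =====
def createWindowGroups_alt (num_windows : Int) (window_time : Int) (end_time : Int) : List (List (String × Int)) :=
  (PySem.List.pyRange 0 num_windows 1).map (fun x =>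
    [("start", end_time - x * (window_time + 1) - window_time),
     ("end", end_time - x * (window_time + 1)),
     ("bytes_fs", 0), ("bytes_ts", 0)])

-- ===== PRECONDITION & SPEC =====
def Spec_createWindowGroups (num_windows : Int) (window_time : Int) (end_time : Int) (out : List (List (String × Int))) : Prop := out = createWindowGroups_alt num_windows window_time end_time
instance (num_windows : Int) (window_time : Int) (end_time : Int) (out : List (List (String × Int))) : Decidable (Spec_createWindowGroups num_windows window_time end_time out) := by unfold Spec_createWindowGroups; infer_instance

-- ===== CLAIM (what is proved, stated in full; the proofs are below) =====
def Claim_equal_createWindowGroups : Prop := ∀ (num_windows : Int) (window_time : Int) (end_time : Int), Dom_createWindowGroups num_windows window_time end_time → Spec_createWindowGroups num_windows window_time end_time (createWindowGroups num_windows window_time end_time)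

-- ===== LEMMAS AND PROOFS =====


/-- Loop invariant for A's fold: after n steps from (acc, e) the accumulated list is acc
    followed by the n windows given by the closed-form index formula, and the carried
    end time is e - n*(w+1). -/
lemma createWindowGroups_fold_key (w e : Int) (n : Nat) (acc : List (List (String × Int))) :
    (List.range n).foldl
      (fun (st : List (List (String × Int)) × Int) (_ : Nat) =>
        let start_time := st.2 - w
        let window_dict : List (String × Int) :=
          [("start", start_time), ("end", st.2), ("bytes_fs", 0), ("bytes_ts", 0)]
        (st.1 ++ [window_dict], start_time - 1))
      (acc, e)
    = (acc ++ (List.range n).map (fun (k : Nat) =>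
        [("start", e - (k : Int) * (w + 1) - w), ("end", e - (k : Int) * (w + 1)),
         ("bytes_fs", 0), ("bytes_ts", 0)]),
       e - (n : Int) * (w + 1)) := by
  induction n with
  | zero => simp
  | succ m ih =>
    rw [List.range_succ, List.foldl_append, ih]
    simp only [List.foldl_cons, List.foldl_nil, List.map_append, List.map_cons,
      Prod.mk.injEq, List.append_assoc]
    exact ⟨rfl, by push_cast; ring⟩

-- ===== VERDICT (by name: the statement is the Claim_ definition above) =====
theorem createWindowGroups_spec : Claim_equal_createWindowGroups := by
  intro n w e _
  unfold Spec_createWindowGroups createWindowGroups createWindowGroups_alt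
  rw [PySem.List.pyRange_one]
  rw [List.foldl_map, createWindowGroups_fold_key w e ((n - 0).toNat) []]
  simp only [List.map_map]
  induction (List.range (n - 0).toNat) with
  | nil => rfl
  | cons a t ih2 => simp_all
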